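-- pv_equiv track=rewrite | github.com/BossCai-790923/PythonClass01 | homework/calendar_display.py | gen_month
-- ===== SOURCE A (Python) =====
-- month_str = ['January', 'Feburary', 'March', 'April', 'May', 'June', 'July', 'August', 'September', 'October', 'November', 'December']
--
-- def gen_month(month, day_one, month_days):
--     result = []
--     result.append(month_str[month-1])
--
--     current_line = ''
--     curent_line_day_count = 0
--
--     day_list = []
--     for space in range(day_one):
--         day_list.append(' ')
--     day_list.extend(list(range(1, month_days + 1)))
--
--     for day in day_list:
--         current_line += str(day)
--         current_line += ' ' * (3 - len(str(day)))
--         curent_line_day_count += 1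
--         if curent_line_day_count == 7:
--             result.append(current_line)
--             current_line = ''
--             curent_line_day_count = 0
--
--     result.append(current_line)
--     return result
-- ===== SOURCE B (Python) =====
-- month_str = ['January', 'Feburary', 'March', 'April', 'May', 'June', 'July', 'August', 'September', 'October', 'November', 'December']
--
-- def gen_month(month, day_one, month_days):
--     days = [' '] * day_one + list(range(1, month_days + 1))
--     lines = [month_str[month - 1]]
--     i = 0
--     while len(days) - i >= 7:
--         lines.append(''.join(str(d).ljust(3) for d in days[i:i+7]))
--         i += 7
--     lines.append(''.join(str(d).ljust(3) for d in days[i:]))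
--     return lines
-- ===== Notes on version B (the rewrite author's own statement) =====
-- stated objective: idiomatic
-- what changed: Replaces A's per-day counter-driven accumulator loop (flush every 7th day) with a two-stage group-then-format decomposition: slice the day list into week chunks by index and join each chunk with str.ljust, always emitting the trailing (possibly empty) line.
import Mathlib
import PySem

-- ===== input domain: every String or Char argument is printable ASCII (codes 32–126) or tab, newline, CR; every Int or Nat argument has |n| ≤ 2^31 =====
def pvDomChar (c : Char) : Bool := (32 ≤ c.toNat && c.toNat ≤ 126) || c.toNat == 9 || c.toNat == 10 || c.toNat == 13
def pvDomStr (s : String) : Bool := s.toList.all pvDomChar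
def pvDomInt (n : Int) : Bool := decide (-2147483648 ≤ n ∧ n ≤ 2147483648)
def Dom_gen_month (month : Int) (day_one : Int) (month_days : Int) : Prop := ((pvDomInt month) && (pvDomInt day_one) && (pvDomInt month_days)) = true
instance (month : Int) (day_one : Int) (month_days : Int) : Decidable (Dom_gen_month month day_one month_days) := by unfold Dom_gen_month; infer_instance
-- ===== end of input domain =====

-- B replaces A's per-day counter accumulator with an index-sliced group-then-format week loop (idiomatic; same cost).


def monthStr : List String := ["January", "Feburary", "March", "April", "May", "June", "July", "August", "September", "October", "November", "December"]

-- ===== PORT A =====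
-- A's day_list mixes the string ' ' and ints; the loop only ever uses str(day), so each
-- element is stored as its str(): ' ' for spaces, PySem.Int.toStr d for days. Exact.
-- "for space in range(day_one): day_list.append(' ')" appends max(day_one,0) = day_one.toNat spaces.
-- A's loop body over (result, current_line, count); "result.append(current_line)" after the loop
-- is the base case of genLoopA.
def genLoopA : List String → List String → String → Int → List String
  | [], result, current_line, _ => result ++ [current_line]
  | day :: rest, result, current_line, cnt =>
    let line := current_line ++ day ++ String.mk (List.replicate (3 - day.toList.length) ' ')
    let cnt := cnt + 1
    if cnt = 7 then genLoopA rest (result ++ [line]) "" 0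
    else genLoopA rest result line cnt

def gen_month (month : Int) (day_one : Int) (month_days : Int) : List String :=
  -- month_str[month-1]: Python raises IndexError outside Pre_; off Pre_ the port's value "" is arbitrary.
  let first := (PySem.List.pyGet? monthStr (month - 1)).getD ""
  let day_list := List.replicate day_one.toNat " "
      ++ (PySem.List.pyRange 1 (month_days + 1) 1).map PySem.Int.toStr
  genLoopA day_list [first] "" 0

-- ===== PORT B =====
-- str(d).ljust(3): pad with spaces to width 3 (no-op when already ≥ 3 long). Exact.
def ljust3 (s : String) : String := s ++ String.mk (List.replicate (3 - s.toList.length) ' ')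

-- ''.join(str(d).ljust(3) for d in week)
def joinFmt (week : List String) : String := week.foldl (fun acc d => acc ++ ljust3 d) ""

-- while len(days) - i >= 7: append week days[i:i+7]; i += 7; afterwards append days[i:].
-- i is always a nonnegative multiple of 7 with i ≤ len(days), so Nat i and take/drop are
-- exact for the slices days[i:i+7] and days[i:].
def weekLoopB (days : List String) (lines : List String) (i : Nat) : List String :=
  if 7 ≤ days.length - i then
    weekLoopB days (lines ++ [joinFmt ((days.drop i).take 7)]) (i + 7)
  else lines ++ [joinFmt (days.drop i)]
termination_by days.length - i
decreasing_by omega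

def gen_month_alt (month : Int) (day_one : Int) (month_days : Int) : List String :=
  let days := List.replicate day_one.toNat " "
      ++ (PySem.List.pyRange 1 (month_days + 1) 1).map PySem.Int.toStr
  let lines := [(PySem.List.pyGet? monthStr (month - 1)).getD ""]
  weekLoopB days lines 0

-- ===== PRECONDITION & SPEC =====
-- Pre_ excludes exactly the inputs where month_str[month-1] raises IndexError in Python
-- (month-1 outside [-12, 11]); on all of Pre_ A returns normally.
def Pre_gen_month (month : Int) (day_one : Int) (month_days : Int) : Prop :=
  -11 ≤ month ∧ month ≤ 12

instance (month : Int) (day_one : Int) (month_days : Int) : Decidable (Pre_gen_month month day_one month_days) := by unfold Pre_gen_month; infer_instance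

def pvWitness_gen_month : Int × Int × Int := (5, 2, 28)

def Spec_gen_month (month : Int) (day_one : Int) (month_days : Int) (out : List String) : Prop := out = gen_month_alt month day_one month_days
instance (month : Int) (day_one : Int) (month_days : Int) (out : List String) : Decidable (Spec_gen_month month day_one month_days out) := by unfold Spec_gen_month; infer_instance

-- ===== CLAIM (what is proved, stated in full; the proofs are below) =====
def Claim_equal_gen_month : Prop := ∀ (month : Int) (day_one : Int) (month_days : Int), Dom_gen_month month day_one month_days → Pre_gen_month month day_one month_days → Spec_gen_month month day_one month_days (gen_month month day_one month_days)

-- ===== LEMMAS AND PROOFS =====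

-- proof-side normal form of B's week loop: recursion on the remaining suffix
def chunkRec : List String → List String → List String
  | l, lines =>
    if 7 ≤ l.length then chunkRec (l.drop 7) (lines ++ [joinFmt (l.take 7)])
    else lines ++ [joinFmt l]
termination_by l => l.length
decreasing_by simp_all; omega

theorem weekLoopB_eq_chunkRec (days : List String) :
    ∀ i lines, weekLoopB days lines i = chunkRec (days.drop i) lines := by
  intro i
  induction hn : days.length - i using Nat.strong_induction_on generalizing i with
  | _ n ih =>
    intro lines
    rw [weekLoopB, chunkRec]
    have hlen : (days.drop i).length = days.length - i := by simp
    by_cases h : 7 ≤ days.length - i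
    · rw [if_pos h, if_pos (by omega : 7 ≤ (days.drop i).length)]
      rw [ih (days.length - (i + 7)) (by omega) (i + 7) rfl]
      simp [List.drop_drop, List.take_drop]
    · rw [if_neg h, if_neg (by omega : ¬ 7 ≤ (days.drop i).length)]

theorem genLoopA_eq_chunkRec : ∀ (n : Nat) (l : List String), l.length ≤ n →
    ∀ res, genLoopA l res "" 0 = chunkRec l res := by
  intro n
  induction n with
  | zero =>
    intro l hl res
    have : l = [] := by cases l <;> simp_all
    subst this
    simp [genLoopA, chunkRec, joinFmt]
  | succ n ih =>
    intro l hl res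
    match l with
    | [] => simp [genLoopA, chunkRec, joinFmt]
    | [a] => simp [genLoopA, chunkRec, joinFmt, ljust3]
    | [a, b] => simp [genLoopA, chunkRec, joinFmt, ljust3, String.append_assoc]
    | [a, b, c] => simp [genLoopA, chunkRec, joinFmt, ljust3, String.append_assoc]
    | [a, b, c, d] => simp [genLoopA, chunkRec, joinFmt, ljust3, String.append_assoc]
    | [a, b, c, d, e] => simp [genLoopA, chunkRec, joinFmt, ljust3, String.append_assoc]
    | [a, b, c, d, e, f] => simp [genLoopA, chunkRec, joinFmt, ljust3, String.append_assoc]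
    | a :: b :: c :: d :: e :: f :: g :: t =>
      have ht : t.length ≤ n := by simp at hl; omega
      rw [chunkRec]
      rw [if_pos (by simp)]
      simp only [genLoopA]
      norm_num [ih t ht, joinFmt, ljust3, String.append_assoc]

-- ===== VERDICT (by name: the statement is the Claim_ definition above) =====
theorem gen_month_spec : Claim_equal_gen_month := by
  intro month day_one month_days _ _
  unfold Spec_gen_month gen_month gen_month_alt
  rw [weekLoopB_eq_chunkRec]
  rw [genLoopA_eq_chunkRec ((List.replicate day_one.toNat " " ++ (PySem.List.pyRange 1 (month_days + 1) 1).map PySem.Int.toStr).length) _ le_rfl]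
  simp
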